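-- pv_equiv track=rewrite | github.com/SilverQ/dl_study | Codewars/First Variation on Caesar Cipher.py | moving_shift
-- ===== SOURCE A (Python) =====
-- def moving_shift(s, shift):
--     if len(s) % 5 == 0:
--         split_len = len(s) // 5
--     else:
--         split_len = len(s) // 5 + 1
--     results_chr = []
--     for j in range(5):
--         results_chr_temp = []
--         splited_s = s[split_len*j:split_len*(j + 1)]
--         for i, c in enumerate(splited_s):
--             if c.isupper():
--                 s_shift = (ord(c) + shift + i + j* split_len - 65) % 26 + 65
--             elif c.islower():
--                 s_shift = (ord(c) + shift + i + j * split_len - 97) % 26 + 97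
--             else:
--                 s_shift = ord(c)
--             results_chr_temp.append(chr(s_shift))
--         results_chr.append(''.join(results_chr_temp))
--     return results_chr
-- ===== SOURCE B (Python) =====
-- def moving_shift(s, shift):
--     # Single pass: route each encrypted character into a dict of 5 buckets by k // split_len.
--     split_len = -(-len(s) // 5)
--     chunks = {j: '' for j in range(5)}
--     for k, c in enumerate(s):
--         if c.isupper():
--             ch = chr((ord(c) + shift + k - 65) % 26 + 65)
--         elif c.islower():
--             ch = chr((ord(c) + shift + k - 97) % 26 + 97)
--         else:
--             ch = c
--         chunks[k // split_len] += ch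
--     return [chunks[j] for j in range(5)]
-- ===== Notes on version B (the rewrite author's own statement) =====
-- stated objective: alternative
-- what changed: B replaces A's five-chunk slicing with nested per-chunk loops by a single pass over enumerate(s) that encrypts each character with its absolute index and routes it into a dict of 5 bucket strings keyed by k // split_len (ceil computed as -(-len(s)//5)); the chunk list is read back from the dict at the end, so no slicing and no per-chunk offset arithmetic remains.
import Mathlib
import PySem

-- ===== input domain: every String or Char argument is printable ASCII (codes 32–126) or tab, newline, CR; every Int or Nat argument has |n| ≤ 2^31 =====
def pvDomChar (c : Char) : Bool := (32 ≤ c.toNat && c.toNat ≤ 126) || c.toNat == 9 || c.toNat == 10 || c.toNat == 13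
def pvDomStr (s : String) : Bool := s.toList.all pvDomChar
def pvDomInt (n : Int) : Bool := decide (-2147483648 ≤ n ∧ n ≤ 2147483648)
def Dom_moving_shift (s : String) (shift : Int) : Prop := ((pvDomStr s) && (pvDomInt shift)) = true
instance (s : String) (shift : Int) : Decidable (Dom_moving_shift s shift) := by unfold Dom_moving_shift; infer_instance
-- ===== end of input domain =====

-- B makes a single pass over enumerate(s), encrypting each character with its absolute index and
-- routing it into a dict of 5 bucket strings keyed by k // split_len, instead of A's five-chunk
-- slicing with nested per-chunk loops; same return value, no side effects.

-- ===== PORT A =====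
-- per-character branch of A's inner loop (isupper/islower are the ASCII range tests; exact on the ASCII domain)
def msA_char (shift i jl : Int) (c : Char) : Char :=
  if 65 ≤ c.toNat ∧ c.toNat ≤ 90 then
    Char.ofNat ((PySem.Int.mod ((c.toNat : Int) + shift + i + jl - 65) 26 + 65).toNat)
  else if 97 ≤ c.toNat ∧ c.toNat ≤ 122 then
    Char.ofNat ((PySem.Int.mod ((c.toNat : Int) + shift + i + jl - 97) 26 + 97).toNat)
  else c

def moving_shift (s : String) (shift : Int) : List String :=
  let n : Int := PySem.Str.len s
  let split_len : Int :=
    if PySem.Int.mod n 5 = 0 then PySem.Int.floordiv n 5 else PySem.Int.floordiv n 5 + 1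
  (PySem.List.pyRange 0 5 1).foldl (fun results_chr j =>
    let splited_s := PySem.List.slice s.toList (some (split_len * j)) (some (split_len * (j + 1)))
    let results_chr_temp := (PySem.List.enumerate splited_s 0).foldl
      (fun acc p => acc ++ [msA_char shift p.1 (j * split_len) p.2]) []
    results_chr ++ [String.ofList results_chr_temp]) []

-- ===== PORT B =====
-- per-character shift at absolute index k (isupper/islower as ASCII range tests; exact on the ASCII domain)
def msB_char (shift k : Int) (c : Char) : Char :=
  if 65 ≤ c.toNat ∧ c.toNat ≤ 90 then
    Char.ofNat ((PySem.Int.mod ((c.toNat : Int) + shift + k - 65) 26 + 65).toNat)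
  else if 97 ≤ c.toNat ∧ c.toNat ≤ 122 then
    Char.ofNat ((PySem.Int.mod ((c.toNat : Int) + shift + k - 97) 26 + 97).toNat)
  else c

-- {j: '' for j in range(5)}  (bucket strings kept as List Char; String.ofList bridges at the end)
def msB_init : PySem.Dict Int (List Char) :=
  (PySem.List.pyRange 0 5 1).foldl (fun d j => d.insert j []) PySem.Dict.empty

def moving_shift_alt (s : String) (shift : Int) : List String :=
  let split_len : Int := -(PySem.Int.floordiv (-(PySem.Str.len s)) 5)
  let chunks := (PySem.List.enumerate s.toList 0).foldl
    (fun d p =>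
      d.modify (PySem.Int.floordiv p.1 split_len) [] (· ++ [msB_char shift p.1 p.2]))
    msB_init
  (PySem.List.pyRange 0 5 1).map (fun j => String.ofList (chunks.getD j []))

-- ===== PRECONDITION & SPEC =====
def Spec_moving_shift (s : String) (shift : Int) (out : List String) : Prop := out = moving_shift_alt s shift
instance (s : String) (shift : Int) (out : List String) : Decidable (Spec_moving_shift s shift out) := by unfold Spec_moving_shift; infer_instance

-- ===== CLAIM (what is proved, stated in full; the proofs are below) =====
def Claim_equal_moving_shift : Prop := ∀ (s : String) (shift : Int), Dom_moving_shift s shift → Spec_moving_shift s shift (moving_shift s shift)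

-- ===== LEMMAS AND PROOFS =====

-- A's shifted character at chunk offset i with chunk base jl is B's at absolute index i + jl
theorem msA_char_eq_msB (shift i jl : Int) (c : Char) :
    msA_char shift i jl c = msB_char shift (i + jl) c := by
  simp [msA_char, msB_char, add_assoc]

-- A's split_len equals the Nat ceiling (len + 4) / 5
theorem splitLen_A (n : Nat) :
    (if PySem.Int.mod (n : Int) 5 = 0 then PySem.Int.floordiv (n : Int) 5
     else PySem.Int.floordiv (n : Int) 5 + 1) = (((n + 4) / 5 : Nat) : Int) := by
  rw [PySem.Int.mod_eq_emod_of_pos (b := 5) (by norm_num), PySem.Int.floordiv_eq_ediv_of_pos (b := 5) (by norm_num)]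
  split_ifs with h <;> omega

-- B's ceiling -(-n // 5) equals the same Nat ceiling
theorem splitLen_B (n : Nat) :
    -(PySem.Int.floordiv (-(n : Int)) 5) = (((n + 4) / 5 : Nat) : Int) := by
  rw [PySem.Int.floordiv_eq_ediv_of_pos (b := 5) (by norm_num)]
  omega

-- the five initial buckets are empty
theorem msB_init_getD : ∀ j : Nat, j < 5 → msB_init.getD (j : Int) [] = [] := by decide

-- filtering the enumerated string by k // L = j yields exactly chunk j, enumerated from L*j
theorem enum_filter_chunk (cs : List Char) (L j : Nat) (hL : 0 < L) :
    (PySem.List.enumerate cs 0).filter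
        (fun p => PySem.Int.floordiv p.1 (L : Int) == (j : Int))
      = PySem.List.enumerate ((cs.drop (L * j)).take L) ((L * j : Nat) : Int) := by
  have hcs : cs = cs.take (L * j) ++ ((cs.drop (L * j)).take L ++ (cs.drop (L * j)).drop L) := by
    rw [List.take_append_drop, List.take_append_drop]
  conv_lhs => rw [hcs]
  rw [PySem.List.enumerate_append, PySem.List.enumerate_append, List.filter_append, List.filter_append]
  have h1 : (PySem.List.enumerate (cs.take (L * j)) 0).filter
      (fun p => PySem.Int.floordiv p.1 (L : Int) == (j : Int)) = [] := by
    apply List.filter_eq_nil_iff.mpr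
    intro p hp
    obtain ⟨k, hk, hpk⟩ := (PySem.List.mem_enumerate_iff _ _ _).mp hp
    subst hpk
    simp only [zero_add, PySem.Int.floordiv_natCast, beq_iff_eq, Int.natCast_inj]
    have hkL : k < j * L := lt_of_lt_of_le hk (by simp [List.length_take, Nat.mul_comm])
    have : k / L < j := (Nat.div_lt_iff_lt_mul hL).mpr hkL
    omega
  have h3 : (PySem.List.enumerate ((cs.drop (L * j)).drop L)
        ((0 : Int) + ((cs.take (L * j)).length : Int) + (((cs.drop (L * j)).take L).length : Int))).filter
      (fun p => PySem.Int.floordiv p.1 (L : Int) == (j : Int)) = [] := by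
    apply List.filter_eq_nil_iff.mpr
    intro p hp
    obtain ⟨k, hk, hpk⟩ := (PySem.List.mem_enumerate_iff _ _ _).mp hp
    subst hpk
    simp only [List.length_drop] at hk
    have hbig : L * j + L < cs.length := by omega
    have hstart : (0 : Int) + ((cs.take (L * j)).length : Int) + (((cs.drop (L * j)).take L).length : Int)
        = ((L * j + L : Nat) : Int) := by
      simp only [List.length_take, List.length_drop]
      have h1' : min (L * j) cs.length = L * j := by omega
      have h2' : min L (cs.length - L * j) = L := by omega
      rw [h1', h2']; push_cast; ring
    rw [hstart]
    have hcast : ((L * j + L : Nat) : Int) + (k : Int) = ((L * (j + 1) + k : Nat) : Int) := by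
      push_cast; ring
    rw [hcast, PySem.Int.floordiv_natCast]
    simp only [beq_iff_eq, Int.natCast_inj]
    have hdiv : (L * (j + 1) + k) / L = (j + 1) + k / L := Nat.mul_add_div hL _ _
    intro h
    rw [hdiv] at h
    generalize k / L = m at h
    omega
  by_cases hjn : cs.length ≤ L * j
  · have hdrop : cs.drop (L * j) = [] := List.drop_eq_nil_of_le hjn
    rw [h1, hdrop]
    simp
  · have htl : ((cs.take (L * j)).length : Int) = ((L * j : Nat) : Int) := by
      simp only [List.length_take]
      congr 1; omega
    have h2 : (PySem.List.enumerate ((cs.drop (L * j)).take L)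
          ((0 : Int) + ((cs.take (L * j)).length : Int))).filter
        (fun p => PySem.Int.floordiv p.1 (L : Int) == (j : Int))
        = PySem.List.enumerate ((cs.drop (L * j)).take L) ((L * j : Nat) : Int) := by
      rw [zero_add, htl]
      apply List.filter_eq_self.mpr
      intro p hp
      obtain ⟨k, hk, hpk⟩ := (PySem.List.mem_enumerate_iff _ _ _).mp hp
      subst hpk
      have hkL : k < L := lt_of_lt_of_le hk (by simp [List.length_take])
      have hcast : ((L * j : Nat) : Int) + (k : Int) = ((L * j + k : Nat) : Int) := by push_cast; ring
      rw [hcast, PySem.Int.floordiv_natCast]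
      simp only [beq_iff_eq, Int.natCast_inj]
      have : (L * j + k) / L = j + k / L := Nat.mul_add_div hL _ _
      have hk0 : k / L = 0 := Nat.div_eq_of_lt hkL
      omega
    rw [h1, h2, h3]
    simp
  -- end enum_filter_chunk

-- A's per-chunk map (offset i, base j*L) equals B's map over the chunk enumerated from L*j
theorem chunk_map_eq (xs : List Char) (shift : Int) (L j : Nat) :
    (PySem.List.enumerate xs 0).map (fun p => msA_char shift p.1 ((j : Int) * (L : Int)) p.2)
      = (PySem.List.enumerate xs ((L * j : Nat) : Int)).map (fun p => msB_char shift p.1 p.2) := by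
  apply List.ext_getElem
  · simp [PySem.List.length_enumerate]
  · intro k h1 h2
    simp only [List.getElem_map, PySem.List.getElem_enumerate]
    rw [msA_char_eq_msB]
    congr 1
    push_cast; ring

-- ===== VERDICT (by name: the statement is the Claim_ definition above) =====
theorem moving_shift_spec : Claim_equal_moving_shift := by
  intro s shift _
  unfold Spec_moving_shift moving_shift moving_shift_alt
  simp only [PySem.Str.len_eq]
  rw [splitLen_A, splitLen_B]
  set L : Nat := (s.toList.length + 4) / 5 with hL
  set cs := s.toList with hcs
  by_cases hnil : cs = []
  · rw [hnil]
    have hL0 : L = 0 := by rw [hL, hnil]; rfl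
    simp [PySem.List.enumerate, hL0, PySem.List.pyRange, PySem.List.slice]
    decide
  · have hn : 0 < cs.length := List.length_pos_iff.mpr hnil
    have hLpos : 0 < L := by rw [hL]; omega
    -- B's dict fold, rewritten as the canonical modify-append fold over the routed pairs
    have hfold :
        (PySem.List.enumerate cs 0).foldl
          (fun d p => d.modify (PySem.Int.floordiv p.1 ((L : Nat) : Int)) []
            (· ++ [msB_char shift p.1 p.2])) msB_init
        = (((PySem.List.enumerate cs 0).map
              (fun p => (PySem.Int.floordiv p.1 ((L : Nat) : Int), msB_char shift p.1 p.2))).foldl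
            (fun d p => d.modify p.1 [] (· ++ [p.2])) msB_init) := by
      rw [List.foldl_map]
    have key : ∀ j : Nat, j < 5 →
        ((PySem.List.enumerate
            (PySem.List.slice cs (some (((L : Nat) : Int) * (j : Int)))
              (some (((L : Nat) : Int) * ((j : Int) + 1)))) 0).foldl
          (fun acc p => acc ++ [msA_char shift p.1 ((j : Int) * ((L : Nat) : Int)) p.2]) [])
        = (((PySem.List.enumerate cs 0).foldl
            (fun d p => d.modify (PySem.Int.floordiv p.1 ((L : Nat) : Int)) []
              (· ++ [msB_char shift p.1 p.2])) msB_init).getD (j : Int) []) := by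
      intro j hj
      rw [hfold, PySem.Dict.getD_foldl_modify_append _ msB_init ((j : Nat) : Int), msB_init_getD j hj]
      rw [List.filter_map, List.map_map]
      have hpred : ((fun p => p.1 == (j : Int)) ∘
            (fun p => (PySem.Int.floordiv p.1 ((L : Nat) : Int), msB_char shift p.1 p.2)))
          = (fun p : Int × Char => PySem.Int.floordiv p.1 ((L : Nat) : Int) == (j : Int)) := rfl
      rw [hpred, enum_filter_chunk cs L j hLpos]
      rw [PySem.List.foldl_append_singleton_eq_map]
      have hcast : (((L : Nat) : Int) * ((j : Int) + 1)) = ((L * j + L : Nat) : Int) := by push_cast; ring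
      have hcast2 : (((L : Nat) : Int) * (j : Int)) = ((L * j : Nat) : Int) := by push_cast; ring
      rw [hcast, hcast2, PySem.List.slice_natCast]
      have hsub : L * j + L - L * j = L := by omega
      rw [hsub, List.nil_append, List.nil_append, chunk_map_eq]
      rfl
    have h5 : PySem.List.pyRange 0 5 1 = [0, 1, 2, 3, 4] := by decide
    rw [h5]
    simp only [List.foldl_cons, List.foldl_nil, List.map_cons, List.map_nil]
    have k0 := key 0 (by norm_num); have k1 := key 1 (by norm_num); have k2 := key 2 (by norm_num)
    have k3 := key 3 (by norm_num); have k4 := key 4 (by norm_num)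
    norm_num at k0 k1 k2 k3 k4 ⊢
    rw [k0, k1, k2, k3, k4]
    exact ⟨rfl, rfl, rfl, rfl, rfl⟩
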